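-- pv_equiv track=rewrite | github.com/scikit-plots/scikit-plots | scikitplot/corpus/_export/_export.py | _compute_csv_fieldnames
-- ===== SOURCE A (Python) =====
-- def _compute_csv_fieldnames(rows):
--     """
--     Compute superset of all keys across all rows.
--
--     Preserves stable ordering: identity fields first, then sorted rest.
--     Prevents silent column loss when later documents have metadata
--     keys absent from the first document.
--     """
--     all_keys = set()
--     for row in rows:
--         all_keys.update(row.keys())
--
--     # Stable ordering: identity fields first
--     identity_order = [
--         "doc_id",
--         "input_path",
--         "chunk_index",
--         "text",
--         "section_type",
--         "chunking_strategy",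
--         "language",
--         "source_type",
--         "source_title",
--         "source_author",
--     ]
--     fieldnames = [k for k in identity_order if k in all_keys]
--     fieldnames += sorted(all_keys - set(fieldnames))
--     return fieldnames
-- ===== SOURCE B (Python) =====
-- def _compute_csv_fieldnames(rows):
--     """Superset of all keys across rows: identity fields first (in order), then the rest sorted."""
--     rank = {
--         "doc_id": 0,
--         "input_path": 1,
--         "chunk_index": 2,
--         "text": 3,
--         "section_type": 4,
--         "chunking_strategy": 5,
--         "language": 6,
--         "source_type": 7,
--         "source_title": 8,
--         "source_author": 9,
--     }
--     all_keys = {k for row in rows for k in row}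
--     return sorted(all_keys, key=lambda k: (rank.get(k, len(rank)), k))
-- ===== Notes on version B (the rewrite author's own statement) =====
-- stated objective: idiomatic
-- what changed: Replaces A's partition-and-concatenate (filter the identity list against the key set, then sort the set difference and append) with a literal rank dict, a flat set comprehension over all rows, and a single sorted() call with the priority key (rank.get(k, len(rank)), k).
import Mathlib
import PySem

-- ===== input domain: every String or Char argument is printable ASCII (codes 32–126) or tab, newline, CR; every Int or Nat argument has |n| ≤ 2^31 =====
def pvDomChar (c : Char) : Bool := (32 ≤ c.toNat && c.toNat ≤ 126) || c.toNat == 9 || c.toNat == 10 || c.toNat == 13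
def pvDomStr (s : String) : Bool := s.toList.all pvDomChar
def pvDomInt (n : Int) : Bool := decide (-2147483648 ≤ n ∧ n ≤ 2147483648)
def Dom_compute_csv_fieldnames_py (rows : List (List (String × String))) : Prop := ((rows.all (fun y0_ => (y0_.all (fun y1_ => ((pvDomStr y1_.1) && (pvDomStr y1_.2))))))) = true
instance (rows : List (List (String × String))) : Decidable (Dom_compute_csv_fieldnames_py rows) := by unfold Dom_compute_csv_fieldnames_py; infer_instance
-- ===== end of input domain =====

-- B replaces A's filter-the-identity-list/sort-the-difference/append partition by a literal
-- rank dict, one flat set comprehension, and a single priority-keyed sort; objective: idiomatic.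

-- ===== PORT A =====
def pvIdOrderA : List String :=
  ["doc_id", "input_path", "chunk_index", "text", "section_type",
   "chunking_strategy", "language", "source_type", "source_title", "source_author"]

def compute_csv_fieldnames_py (rows : List (List (String × String))) : List String :=
  let all_keys : PySem.Set String :=
    rows.foldl (fun s row => PySem.Set.update s ((PySem.Dict.ofList row).keys)) PySem.Set.empty
  let fieldnames := pvIdOrderA.filter (fun k => PySem.Set.contains all_keys k)
  fieldnames ++ PySem.List.sorted (PySem.Set.diff all_keys (PySem.Set.ofList fieldnames)) (fun x => x) false

-- ===== PORT B =====
-- rank = {"doc_id": 0, ..., "source_author": 9}   (a dict literal)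
def pvRankB : PySem.Dict String Int :=
  PySem.Dict.ofList
    [("doc_id", 0), ("input_path", 1), ("chunk_index", 2), ("text", 3), ("section_type", 4),
     ("chunking_strategy", 5), ("language", 6), ("source_type", 7), ("source_title", 8),
     ("source_author", 9)]

def compute_csv_fieldnames_py_alt (rows : List (List (String × String))) : List String :=
  -- all_keys = {k for row in rows for k in row}
  let all_keys : PySem.Set String :=
    PySem.Set.ofList (rows.flatMap (fun row => (PySem.Dict.ofList row).keys))
  PySem.List.sorted2 all_keys (fun k => PySem.Dict.getD pvRankB k ((PySem.Dict.size pvRankB : Int))) (fun k => k) false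

-- ===== PRECONDITION & SPEC =====
def Spec_compute_csv_fieldnames_py (rows : List (List (String × String))) (out : List String) : Prop := out = compute_csv_fieldnames_py_alt rows
instance (rows : List (List (String × String))) (out : List String) : Decidable (Spec_compute_csv_fieldnames_py rows out) := by unfold Spec_compute_csv_fieldnames_py; infer_instance

-- ===== CLAIM (what is proved, stated in full; the proofs are below) =====
def Claim_equal_compute_csv_fieldnames_py : Prop := ∀ (rows : List (List (String × String))), Dom_compute_csv_fieldnames_py rows → Spec_compute_csv_fieldnames_py rows (compute_csv_fieldnames_py rows)

-- ===== LEMMAS AND PROOFS =====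

-- B's priority key
def pvK1 (k : String) : Int := PySem.Dict.getD pvRankB k ((PySem.Dict.size pvRankB : Int))

-- sorted2 with keys (k1, k2) is sorted with the single lexicographic key
theorem pv_sorted2_eq_sorted_lex {α : Type} (xs : List α) (k1 : α → Int) (k2 : α → String) :
    PySem.List.sorted2 xs k1 k2 false
      = PySem.List.sorted xs (fun x => toLex (k1 x, k2 x)) false := by
  have h : (fun a b : α => decide (k1 a < k1 b) || (!decide (k1 b < k1 a) && decide (k2 a < k2 b)))
      = (fun a b : α => decide (toLex (k1 a, k2 a) < toLex (k1 b, k2 b))) := by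
    funext a b
    rcases lt_trichotomy (k1 a) (k1 b) with h1 | h1 | h1
    · have hl : toLex (k1 a, k2 a) < toLex (k1 b, k2 b) := Prod.Lex.lt_iff.2 (Or.inl h1)
      rw [decide_eq_true h1, decide_eq_true hl]
      simp
    · have e1 : decide (k1 a < k1 b) = false := decide_eq_false (by simp [h1])
      have e2 : decide (k1 b < k1 a) = false := decide_eq_false (by simp [h1])
      have hl : (toLex (k1 a, k2 a) < toLex (k1 b, k2 b)) ↔ k2 a < k2 b := by
        rw [Prod.Lex.lt_iff]; simp [h1]
      rw [e1, e2]
      simp only [Bool.false_or, Bool.not_false, Bool.true_and]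
      exact decide_eq_decide.mpr hl.symm
    · have hl : ¬ toLex (k1 a, k2 a) < toLex (k1 b, k2 b) := by
        intro hc
        rcases Prod.Lex.lt_iff.1 hc with h | ⟨he, -⟩
        · exact absurd h (asymm h1)
        · exact absurd he (ne_of_gt h1)
      rw [decide_eq_false (asymm h1), decide_eq_true h1, decide_eq_false hl]
      simp
  show xs.foldl (fun acc x => PySem.List.insertBy
      (fun a b : α => decide (k1 a < k1 b) || (!decide (k1 b < k1 a) && decide (k2 a < k2 b))) x acc) []
    = xs.foldl (fun acc x => PySem.List.insertBy
      (fun a b : α => decide (toLex (k1 a, k2 a) < toLex (k1 b, k2 b))) x acc) []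
  rw [h]

theorem pv_nodup_allkeys (rows : List (List (String × String))) (s : PySem.Set String)
    (hs : List.Nodup s) :
    List.Nodup (rows.foldl (fun s row => PySem.Set.update s ((PySem.Dict.ofList row).keys)) s) := by
  induction rows generalizing s with
  | nil => exact hs
  | cons r rs ih => exact ih _ (PySem.Set.nodup_update _ _ hs)

-- membership in A's folded key set = membership in some row's keys
theorem pv_mem_allkeys (rows : List (List (String × String))) (s : PySem.Set String) (k : String) :
    k ∈ rows.foldl (fun s row => PySem.Set.update s ((PySem.Dict.ofList row).keys)) s
      ↔ k ∈ s ∨ k ∈ rows.flatMap (fun row => (PySem.Dict.ofList row).keys) := by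
  induction rows generalizing s with
  | nil => simp
  | cons r rs ih =>
    simp only [List.foldl_cons, List.flatMap_cons, List.mem_append, ih, PySem.Set.mem_update]
    tauto

theorem pv_rank_mem : ∀ a ∈ pvIdOrderA, pvK1 a < (PySem.Dict.size pvRankB : Int) := by decide

theorem pv_rank_pairwise : pvIdOrderA.Pairwise (fun a b => pvK1 a < pvK1 b) := by decide

theorem pv_idOrder_nodup : pvIdOrderA.Nodup := by decide

theorem pv_rank_out (x : String) (hx : x ∉ pvIdOrderA) : pvK1 x = (PySem.Dict.size pvRankB : Int) := by
  simp only [pvIdOrderA, List.mem_cons, not_or, List.not_mem_nil] at hx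
  obtain ⟨h1, h2, h3, h4, h5, h6, h7, h8, h9, h10, -⟩ := hx
  have hd : pvRankB = PySem.Dict.mk
      [("doc_id", (0 : Int)), ("input_path", 1), ("chunk_index", 2), ("text", 3),
       ("section_type", 4), ("chunking_strategy", 5), ("language", 6), ("source_type", 7),
       ("source_title", 8), ("source_author", 9)] := by decide
  rw [pvK1, PySem.Dict.getD_eq_get?_getD, hd]
  have g1 : ¬(("doc_id" : String) = x) := fun h => h1 h.symm
  have g2 : ¬(("input_path" : String) = x) := fun h => h2 h.symm
  have g3 : ¬(("chunk_index" : String) = x) := fun h => h3 h.symm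
  have g4 : ¬(("text" : String) = x) := fun h => h4 h.symm
  have g5 : ¬(("section_type" : String) = x) := fun h => h5 h.symm
  have g6 : ¬(("chunking_strategy" : String) = x) := fun h => h6 h.symm
  have g7 : ¬(("language" : String) = x) := fun h => h7 h.symm
  have g8 : ¬(("source_type" : String) = x) := fun h => h8 h.symm
  have g9 : ¬(("source_title" : String) = x) := fun h => h9 h.symm
  have g10 : ¬(("source_author" : String) = x) := fun h => h10 h.symm
  simp only [PySem.Dict.get?_mk_cons, beq_iff_eq, if_neg g1, if_neg g2, if_neg g3, if_neg g4,
             if_neg g5, if_neg g6, if_neg g7, if_neg g8, if_neg g9, if_neg g10]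
  rfl

-- the heart: for nodup key lists with equal membership, A's partition equals B's priority sort
theorem pv_main (KA KB : PySem.Set String) (hKA : List.Nodup KA) (hKB : List.Nodup KB)
    (hmem : ∀ k, k ∈ KA ↔ k ∈ KB) :
    (pvIdOrderA.filter (fun k => PySem.Set.contains KA k)) ++
      PySem.List.sorted (PySem.Set.diff KA (PySem.Set.ofList (pvIdOrderA.filter (fun k => PySem.Set.contains KA k)))) (fun x => x) false
    = PySem.List.sorted2 KB (fun k => PySem.Dict.getD pvRankB k ((PySem.Dict.size pvRankB : Int))) (fun k => k) false := by
  set fn := pvIdOrderA.filter (fun k => PySem.Set.contains KA k) with hfn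
  set rest := PySem.Set.diff KA (PySem.Set.ofList fn) with hrest
  set sr := PySem.List.sorted rest (fun x => x) false with hsr
  have hk1 : (fun k => PySem.Dict.getD pvRankB k ((PySem.Dict.size pvRankB : Int))) = pvK1 := rfl
  rw [hk1, pv_sorted2_eq_sorted_lex]
  -- membership facts
  have hfm : ∀ k, k ∈ fn ↔ k ∈ pvIdOrderA ∧ k ∈ KA := by
    intro k
    rw [hfn, List.mem_filter]
    exact and_congr_right fun _ => PySem.Set.contains_iff KA k
  have hsrm : ∀ k, k ∈ sr ↔ k ∈ KA ∧ k ∉ fn := by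
    intro k
    rw [hsr, PySem.List.mem_sorted, hrest, PySem.Set.mem_diff]
    exact and_congr_right fun _ => not_congr (PySem.Set.mem_ofList fn k)
  have hsr_notid : ∀ k ∈ sr, k ∉ pvIdOrderA := by
    intro k hk hid
    obtain ⟨hkK, hknfn⟩ := (hsrm k).1 hk
    exact hknfn ((hfm k).2 ⟨hid, hkK⟩)
  -- nodup facts
  have hfnN : fn.Nodup := by rw [hfn]; exact pv_idOrder_nodup.filter _
  have hsrN : sr.Nodup := (PySem.List.sorted_perm rest (fun x => x) false).symm.nodup
    (PySem.Set.nodup_diff KA _ hKA)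
  have htN : (fn ++ sr).Nodup := by
    rw [List.nodup_append]
    refine ⟨hfnN, hsrN, fun a ha b hb hab => ?_⟩
    exact ((hsrm b).1 hb).2 (hab ▸ ha)
  -- permutation with B's key list
  have hperm : (fn ++ sr).Perm KB := by
    rw [List.perm_ext_iff_of_nodup htN hKB]
    intro a
    rw [List.mem_append, hsrm a, ← hmem a]
    by_cases hid : a ∈ fn
    · simp [hid, ((hfm a).1 hid).2]
    · simp [hid]
  -- pairwise (strictly increasing lexicographic key)
  have hpair : (fn ++ sr).Pairwise
      (fun a b => (fun x => toLex (pvK1 x, x)) a < (fun x => toLex (pvK1 x, x)) b) := by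
    rw [List.pairwise_append]
    refine ⟨?_, ?_, ?_⟩
    · have := (pv_rank_pairwise.filter (fun k => PySem.Set.contains KA k))
      rw [hfn]
      exact this.imp fun h => Prod.Lex.lt_iff.2 (Or.inl h)
    · have hle : sr.Pairwise (fun a b : String => a ≤ b) :=
        PySem.List.sorted_pairwise rest (fun x => x)
      have hne : sr.Pairwise (fun a b : String => a ≠ b) := hsrN
      refine (hle.and hne).imp_of_mem ?_
      intro a b ha hb hab
      have hk : pvK1 a = pvK1 b := by
        rw [pv_rank_out a (hsr_notid a ha), pv_rank_out b (hsr_notid b hb)]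
      exact Prod.Lex.lt_iff.2 (Or.inr ⟨hk, lt_of_le_of_ne hab.1 hab.2⟩)
    · intro a ha b hb
      have hk : pvK1 a < pvK1 b := by
        rw [pv_rank_out b (hsr_notid b hb)]
        exact pv_rank_mem a ((hfm a).1 ha).1
      exact Prod.Lex.lt_iff.2 (Or.inl hk)
  exact (PySem.List.sorted_eq_of_perm_of_pairwise_lt KB (fn ++ sr) _ hperm hpair).symm

-- ===== VERDICT (by name: the statement is the Claim_ definition above) =====
theorem compute_csv_fieldnames_py_spec : Claim_equal_compute_csv_fieldnames_py := by
  intro rows _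
  unfold Spec_compute_csv_fieldnames_py compute_csv_fieldnames_py compute_csv_fieldnames_py_alt
  refine pv_main _ _ (pv_nodup_allkeys rows [] List.nodup_nil) (PySem.Set.nodup_ofList _) ?_
  intro k
  rw [pv_mem_allkeys, PySem.Set.mem_ofList]
  simp
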